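-- pv_equiv track=rewrite | github.com/nlvargas/MATE | code/server/optimization.py | create_subsets
-- ===== SOURCE A (Python) =====
-- from collections import defaultdict
--
-- def create_subsets(G, preferences, D):
--     G_t = defaultdict(list)  # grupos asociados al tema t
--     G_d = defaultdict(list)  # grupos asociados al dia/seccion d
--     G_td = defaultdict(list)
--     for g in G:
--         if D:
--             for p in preferences:
--                 if "Tema {} - ".format(p) in g:
--                     G_t[p].append(g)
--             for d in D:
--                 if " - {} (N".format(d) in g:
--                     G_d[d].append(g)
--             for t in preferences:
--                 for d in D:
--                     if "Tema {} - ".format(t) in g and " - {} (N".format(d) in g: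
--                         G_td[t, d].append(g)
--         else:
--             for p in preferences:
--                 if "Tema {} ".format(p) in g:
--                     G_t[p].append(g)
--     return G_t, G_d, G_td
-- ===== SOURCE B (Python) =====
-- def _group(pairs):
--     out = {}
--     for k, v in pairs:
--         out.setdefault(k, []).append(v)
--     return out
--
--
-- def create_subsets(G, preferences, D):
--     if D:
--         tpats = [(p, "Tema {} - ".format(p)) for p in preferences]
--         dpats = [(d, " - {} (N".format(d)) for d in D]
--         hits = [(g, [p for p, pat in tpats if pat in g],
--                     [d for d, pat in dpats if pat in g]) for g in G]
--         G_t = _group((p, g) for g, ts, _ in hits for p in ts)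
--         G_d = _group((d, g) for g, _, ds in hits for d in ds)
--         G_td = _group(((t, d), g) for g, ts, ds in hits for t in ts for d in ds)
--     else:
--         G_t = _group((p, g) for g in G for p in preferences
--                      if "Tema {} ".format(p) in g)
--         G_d = {}
--         G_td = {}
--     return G_t, G_d, G_td
-- ===== Notes on version B (the rewrite author's own statement) =====
-- stated objective: faster
-- what changed: B is staged instead of A's incremental single pass over three dicts: it precomputes the substring patterns once, computes each string's matched topic/day lists once, flattens them into three (key, group) event streams (the topic-day stream via the product of the two match lists), and groups each stream with one generic grouping helper; A's nested per-pair rescan with repeated pattern formatting disappears.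
import Mathlib
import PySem

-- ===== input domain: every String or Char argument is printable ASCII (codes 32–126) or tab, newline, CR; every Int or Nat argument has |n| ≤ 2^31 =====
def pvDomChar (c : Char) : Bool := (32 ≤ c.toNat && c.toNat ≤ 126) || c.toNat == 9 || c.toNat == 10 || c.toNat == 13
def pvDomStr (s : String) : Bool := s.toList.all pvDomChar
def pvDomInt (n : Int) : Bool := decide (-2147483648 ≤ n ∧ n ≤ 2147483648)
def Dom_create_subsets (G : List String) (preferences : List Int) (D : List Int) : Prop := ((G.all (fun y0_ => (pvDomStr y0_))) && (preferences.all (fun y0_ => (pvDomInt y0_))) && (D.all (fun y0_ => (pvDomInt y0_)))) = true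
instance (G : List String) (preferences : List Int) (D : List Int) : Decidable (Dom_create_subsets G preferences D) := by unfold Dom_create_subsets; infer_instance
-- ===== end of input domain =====

-- B replaces A's incremental single pass (three dicts updated per string, with a nested
-- topic×day rescan) by a staged pipeline: patterns precomputed once, per-string match
-- lists computed once, flattened into three (key, group) event streams, grouped by one
-- generic helper (objective: faster).

-- shared format-string helpers: "Tema {} - ".format(p), " - {} (N".format(d), "Tema {} ".format(p)
def pvTemaPat (p : Int) : List Char := "Tema ".toList ++ (PySem.Int.toStr p).toList ++ " - ".toList
def pvDayPat (d : Int) : List Char := " - ".toList ++ (PySem.Int.toStr d).toList ++ " (N".toList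
def pvTemaPat0 (p : Int) : List Char := "Tema ".toList ++ (PySem.Int.toStr p).toList ++ " ".toList

-- ===== PORT A =====
def create_subsets (G : List String) (preferences : List Int) (D : List Int) : (List (Int × List String)) × (List (Int × List String)) × (List (Int × Int × List String)) :=
  let st := G.foldl
    (fun (s : PySem.Dict Int (List String) × PySem.Dict Int (List String) × PySem.Dict (Int × Int) (List String)) g =>
      if D ≠ [] then
        (preferences.foldl
           (fun acc p => if PySem.Chars.isIn (pvTemaPat p) g.toList then acc.modify p [] (· ++ [g]) else acc) s.1,
         D.foldl
           (fun acc d => if PySem.Chars.isIn (pvDayPat d) g.toList then acc.modify d [] (· ++ [g]) else acc) s.2.1,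
         preferences.foldl
           (fun acc t => D.foldl
             (fun acc d => if PySem.Chars.isIn (pvTemaPat t) g.toList && PySem.Chars.isIn (pvDayPat d) g.toList
                           then acc.modify (t, d) [] (· ++ [g]) else acc) acc) s.2.2)
      else
        (preferences.foldl
           (fun acc p => if PySem.Chars.isIn (pvTemaPat0 p) g.toList then acc.modify p [] (· ++ [g]) else acc) s.1,
         s.2.1, s.2.2))
    (PySem.Dict.empty, PySem.Dict.empty, PySem.Dict.empty)
  (st.1.items, st.2.1.items, st.2.2.items.map (fun p => (p.1.1, p.1.2, p.2)))

-- ===== PORT B =====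
-- _group(pairs): one dict built from a flat (key, value) event stream
def pvGroup {κ : Type} [BEq κ] (pairs : List (κ × String)) : PySem.Dict κ (List String) :=
  pairs.foldl (fun d kv => d.modify kv.1 [] (· ++ [kv.2])) PySem.Dict.empty

def create_subsets_alt (G : List String) (preferences : List Int) (D : List Int) : (List (Int × List String)) × (List (Int × List String)) × (List (Int × Int × List String)) :=
  if D ≠ [] then
    let tpats := preferences.map (fun p => (p, pvTemaPat p))
    let dpats := D.map (fun d => (d, pvDayPat d))
    let hits := G.map (fun g =>
      (g, (tpats.filter (fun q => PySem.Chars.isIn q.2 g.toList)).map (·.1),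
          (dpats.filter (fun q => PySem.Chars.isIn q.2 g.toList)).map (·.1)))
    let G_t := pvGroup (hits.flatMap (fun h => h.2.1.map (fun p => (p, h.1))))
    let G_d := pvGroup (hits.flatMap (fun h => h.2.2.map (fun d => (d, h.1))))
    let G_td := pvGroup (hits.flatMap (fun h => h.2.1.flatMap (fun t => h.2.2.map (fun d => ((t, d), h.1)))))
    (G_t.items, G_d.items, G_td.items.map (fun p => (p.1.1, p.1.2, p.2)))
  else
    let G_t := pvGroup (G.flatMap (fun g =>
      (preferences.filter (fun p => PySem.Chars.isIn (pvTemaPat0 p) g.toList)).map (fun p => (p, g))))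
    (G_t.items, [], [])

-- ===== PRECONDITION & SPEC =====
def Spec_create_subsets (G : List String) (preferences : List Int) (D : List Int) (out : (List (Int × List String)) × (List (Int × List String)) × (List (Int × Int × List String))) : Prop := out = create_subsets_alt G preferences D
instance (G : List String) (preferences : List Int) (D : List Int) (out : (List (Int × List String)) × (List (Int × List String)) × (List (Int × Int × List String))) : Decidable (Spec_create_subsets G preferences D out) := by unfold Spec_create_subsets; infer_instance

-- ===== CLAIM (what is proved, stated in full; the proofs are below) =====
def Claim_equal_create_subsets : Prop := ∀ (G : List String) (preferences : List Int) (D : List Int), Dom_create_subsets G preferences D → Spec_create_subsets G preferences D (create_subsets G preferences D)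

-- ===== LEMMAS AND PROOFS =====

-- a fold over a triple whose components are updated independently is three folds
lemma foldl_prod3 {α σ1 σ2 σ3 : Type} (f1 : σ1 → α → σ1) (f2 : σ2 → α → σ2) (f3 : σ3 → α → σ3)
    (l : List α) (a : σ1) (b : σ2) (c : σ3) :
    l.foldl (fun s x => (f1 s.1 x, f2 s.2.1 x, f3 s.2.2 x)) (a, b, c)
      = (l.foldl f1 a, l.foldl f2 b, l.foldl f3 c) := by
  induction l generalizing a b c with
  | nil => rfl
  | cons x t ih => simp only [List.foldl_cons]; exact ih _ _ _

-- a loop that folds each x's event list equals one fold over the flattened stream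
lemma foldl_flatMap_events {σ α β : Type} (f : α → List β) (upd : σ → β → σ) (l : List α) (s : σ) :
    l.foldl (fun acc x => (f x).foldl upd acc) s = (l.flatMap f).foldl upd s := by
  induction l generalizing s with
  | nil => rfl
  | cons x t ih => simp only [List.foldl_cons, List.flatMap_cons, List.foldl_append]; exact ih _

-- A's nested pair loop with a conjoined test equals the product of the two filtered lists
lemma nested_fold_eq {σ α β : Type} (P : α → Bool) (Q : β → Bool) (f : σ → α → β → σ)
    (l1 : List α) (l2 : List β) (init : σ) :
    l1.foldl (fun s t => l2.foldl (fun s d => if P t && Q d then f s t d else s) s) init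
      = (l1.filter P).foldl (fun s t => (l2.filter Q).foldl (fun s d => f s t d) s) init := by
  have inner : ∀ t s, l2.foldl (fun s d => if P t && Q d then f s t d else s) s
      = if P t then (l2.filter Q).foldl (fun s d => f s t d) s else s := by
    intro t s
    by_cases h : P t = true
    · simp only [h, Bool.true_and, if_true]
      exact PySem.List.foldl_if_eq_foldl_filter Q (fun s d => f s t d) l2 s
    · simp only [Bool.not_eq_true] at h
      simp [h]
  calc l1.foldl (fun s t => l2.foldl (fun s d => if P t && Q d then f s t d else s) s) init
      = l1.foldl (fun s t => if P t then (l2.filter Q).foldl (fun s d => f s t d) s else s) init :=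
        PySem.List.foldl_congr_mem l1 _ _ init (fun acc x _ => inner x acc)
    _ = (l1.filter P).foldl (fun s t => (l2.filter Q).foldl (fun s d => f s t d) s) init :=
        PySem.List.foldl_if_eq_foldl_filter P (fun s t => (l2.filter Q).foldl (fun s d => f s t d) s) l1 init

-- B's per-string matched-key lists, after unfolding the precomputed pattern pairs
lemma hits_proj (preferences : List Int) (pat : Int → List Char) (g : String) :
    ((preferences.map (fun p => (p, pat p))).filter (fun q => PySem.Chars.isIn q.2 g.toList)).map (·.1)
      = preferences.filter (fun p => PySem.Chars.isIn (pat p) g.toList) := by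
  rw [List.filter_map, List.map_map]
  simp [Function.comp_def, List.map_id']

-- one bucketed fold (an if-guarded dict append over keys) equals grouping that string's event list
lemma per_g_fold (keys : List Int) (pat : Int → List Char) (g : String)
    (a : PySem.Dict Int (List String)) :
    keys.foldl (fun acc p => if PySem.Chars.isIn (pat p) g.toList then acc.modify p [] (· ++ [g]) else acc) a
      = ((keys.filter (fun p => PySem.Chars.isIn (pat p) g.toList)).map (fun p => (p, g))).foldl
          (fun d kv => d.modify kv.1 [] (· ++ [kv.2])) a := by
  rw [PySem.List.foldl_if_eq_foldl_filter, List.foldl_map]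

-- ===== VERDICT (by name: the statement is the Claim_ definition above) =====
theorem create_subsets_spec : Claim_equal_create_subsets := by
  intro G preferences D _
  unfold Spec_create_subsets create_subsets create_subsets_alt
  by_cases hD : D ≠ []
  · simp only [if_pos hD]
    have h := foldl_prod3
      (fun (a : PySem.Dict Int (List String)) (g : String) => preferences.foldl
          (fun acc p => if PySem.Chars.isIn (pvTemaPat p) g.toList then acc.modify p [] (· ++ [g]) else acc) a)
      (fun (a : PySem.Dict Int (List String)) (g : String) => D.foldl
          (fun acc d => if PySem.Chars.isIn (pvDayPat d) g.toList then acc.modify d [] (· ++ [g]) else acc) a)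
      (fun (a : PySem.Dict (Int × Int) (List String)) (g : String) => preferences.foldl
          (fun acc t => D.foldl
            (fun acc d => if PySem.Chars.isIn (pvTemaPat t) g.toList && PySem.Chars.isIn (pvDayPat d) g.toList
                          then acc.modify (t, d) [] (· ++ [g]) else acc) acc) a)
      G PySem.Dict.empty PySem.Dict.empty PySem.Dict.empty
    rw [h]
    refine Prod.ext ?_ (Prod.ext ?_ ?_) <;>
      simp only [pvGroup, List.flatMap_map, hits_proj]
    · rw [PySem.List.foldl_congr_mem G _ _ _ (fun a g _ => per_g_fold preferences pvTemaPat g a),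
        foldl_flatMap_events]
    · rw [PySem.List.foldl_congr_mem G _ _ _ (fun a g _ => per_g_fold D pvDayPat g a),
        foldl_flatMap_events]
    · rw [PySem.List.foldl_congr_mem G
        (g := fun a g => ((preferences.filter (fun t => PySem.Chars.isIn (pvTemaPat t) g.toList)).flatMap
            (fun t => (D.filter (fun d => PySem.Chars.isIn (pvDayPat d) g.toList)).map (fun d => ((t, d), g)))).foldl
            (fun d kv => d.modify kv.1 [] (· ++ [kv.2])) a)
        _ _ ?_, foldl_flatMap_events]
      intro a g _
      rw [nested_fold_eq,
        PySem.List.foldl_congr_mem _ _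
          (g := fun (s : PySem.Dict (Int × Int) (List String)) t =>
            ((D.filter (fun d => PySem.Chars.isIn (pvDayPat d) g.toList)).map (fun d => ((t, d), g))).foldl
              (fun d kv => d.modify kv.1 [] (· ++ [kv.2])) s)
          _ (fun acc t _ => List.foldl_map.symm),
        foldl_flatMap_events]
  · simp only [if_neg hD]
    have h := foldl_prod3
      (fun (a : PySem.Dict Int (List String)) (g : String) => preferences.foldl
          (fun acc p => if PySem.Chars.isIn (pvTemaPat0 p) g.toList then acc.modify p [] (· ++ [g]) else acc) a)
      (fun (a : PySem.Dict Int (List String)) (_ : String) => a)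
      (fun (a : PySem.Dict (Int × Int) (List String)) (_ : String) => a)
      G PySem.Dict.empty PySem.Dict.empty PySem.Dict.empty
    rw [h]
    simp only [PySem.List.foldl_ignore, pvGroup]
    rw [PySem.List.foldl_congr_mem G _ _ _ (fun a g _ => per_g_fold preferences pvTemaPat0 g a),
      foldl_flatMap_events]
    rfl
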